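-- pv_equiv track=rewrite | github.com/celeritas-project/regression | summarize.py | calc_emptying_step
-- ===== SOURCE A (Python) =====
-- def calc_emptying_step(active):
--     if not active:
--         # No statistics saved
--         return None
--     active_it = iter(active)
--     prev = next(active_it)
--     max_cap = 0
--     result = None
--     for (i, cur) in enumerate(active_it, start=1):
--         max_cap = max(prev, max_cap)
--         if prev == max_cap and cur < max_cap:
--             result = i
--         prev = cur
--     return result
-- ===== SOURCE B (Python) =====
-- def calc_emptying_step(active):
--     if not active:
--         # No statistics saved
--         return None
--     xs = list(active)
--     n = len(xs)
--     # prefix-maximum table: pmax[i] == max(0, xs[0], ..., xs[i-1])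
--     pmax = [0] * (n + 1)
--     for i in range(n):
--         pmax[i + 1] = max(pmax[i], xs[i])
--     # last step where capacity was at its running max and then decreased
--     for i in range(n - 1, 0, -1):
--         if xs[i - 1] == pmax[i] and xs[i] < pmax[i]:
--             return i
--     return None
-- ===== Notes on version B (the rewrite author's own statement) =====
-- stated objective: alternative
-- what changed: Replaces A's single fused forward scan carrying (prev, running-max, last-hit) state with a prefix-maximum table built first plus a separate backward index scan that returns at the first (i.e. last) matching step.
import Mathlib
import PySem

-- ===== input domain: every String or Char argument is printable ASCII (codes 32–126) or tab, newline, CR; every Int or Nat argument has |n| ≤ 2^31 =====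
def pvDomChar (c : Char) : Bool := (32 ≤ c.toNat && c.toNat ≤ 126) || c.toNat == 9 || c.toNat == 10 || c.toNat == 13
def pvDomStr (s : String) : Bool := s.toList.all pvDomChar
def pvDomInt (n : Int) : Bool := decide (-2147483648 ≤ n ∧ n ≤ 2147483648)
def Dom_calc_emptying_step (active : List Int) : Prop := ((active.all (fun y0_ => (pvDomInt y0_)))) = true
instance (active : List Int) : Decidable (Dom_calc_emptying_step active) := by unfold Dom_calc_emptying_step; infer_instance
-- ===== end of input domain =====

-- B replaces A's fused forward scan by a prefix-max table plus a backward search (objective: alternative; same cost).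

-- ===== PORT A =====
-- the for-loop over enumerate(active_it, start=1) with state (prev, max_cap, result)
def pvLoopA (prev maxCap : Int) (result : Option Int) (i : Int) : List Int → Option Int
  | [] => result
  | cur :: t =>
      let m := max prev maxCap
      pvLoopA cur m (if prev = m ∧ cur < m then some i else result) (i + 1) t

def calc_emptying_step (active : List Int) : Option Int :=
  match active with
  | [] => none
  | a :: rest => pvLoopA a 0 none 1 rest

-- ===== PORT B =====
-- the table-building loop: pmax[i+1] = max(pmax[i], xs[i]); returns [pmax[0], ..., pmax[n]]
def pvBuildPmax (cur : Int) : List Int → List Int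
  | [] => [cur]
  | x :: t => cur :: pvBuildPmax (max cur x) t

-- the backward loop `for i in range(n-1, 0, -1)`: checks index k+1, then k, ..., down to 1
def pvFindB (xs pmax : List Int) : Nat → Option Int
  | 0 => none
  | k + 1 =>
      if xs.getD k 0 = pmax.getD (k + 1) 0 ∧ xs.getD (k + 1) 0 < pmax.getD (k + 1) 0 then
        some ((k : Int) + 1)
      else pvFindB xs pmax k

def calc_emptying_step_alt (active : List Int) : Option Int :=
  if active = [] then none
  else
    let pmax := pvBuildPmax 0 active
    pvFindB active pmax (active.length - 1)

-- ===== PRECONDITION & SPEC =====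
def Spec_calc_emptying_step (active : List Int) (out : Option Int) : Prop := out = calc_emptying_step_alt active
instance (active : List Int) (out : Option Int) : Decidable (Spec_calc_emptying_step active out) := by unfold Spec_calc_emptying_step; infer_instance

-- ===== CLAIM (what is proved, stated in full; the proofs are below) =====
def Claim_equal_calc_emptying_step : Prop := ∀ (active : List Int), Dom_calc_emptying_step active → Spec_calc_emptying_step active (calc_emptying_step active)

-- ===== LEMMAS AND PROOFS =====

-- specification prefix max: pm xs i = max(0, xs[0..i-1])
def pvPm (xs : List Int) (i : Nat) : Int := (xs.take i).foldl max 0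

-- the shared match candidate at index j (1 ≤ j ≤ n-1)
def pvCand (xs : List Int) (j : Nat) : Option Int :=
  if xs.getD (j - 1) 0 = pvPm xs j ∧ xs.getD j 0 < pvPm xs j then some (j : Int) else none

-- "last match" over a list of indices: later (deeper) indices take priority
def pvListOr (xs : List Int) (l : List Nat) : Option Int :=
  l.foldr (fun i acc => acc.or (pvCand xs i)) none

theorem pvFoldlMax_concat (l : List Int) (c a : Int) :
    (l ++ [a]).foldl max c = max (l.foldl max c) a := by
  simp [List.foldl_append]

theorem pvPm_succ (xs : List Int) (j : Nat) (hj : j < xs.length) :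
    pvPm xs (j + 1) = max (pvPm xs j) (xs.getD j 0) := by
  unfold pvPm
  have h1 : xs.take (j + 1) = xs.take j ++ [xs.getD j 0] := by
    rw [List.take_add_one, List.getElem?_eq_getElem hj, List.getD_eq_getElem _ _ hj]
    rfl
  rw [h1, pvFoldlMax_concat]

theorem pvBuildPmax_getD (xs : List Int) (c : Int) (i : Nat) (hi : i ≤ xs.length) :
    (pvBuildPmax c xs).getD i 0 = (xs.take i).foldl max c := by
  induction xs generalizing c i with
  | nil =>
      have : i = 0 := by simpa using hi
      subst this
      simp [pvBuildPmax]
  | cons x t ih =>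
      cases i with
      | zero => simp [pvBuildPmax]
      | succ k =>
          simp only [pvBuildPmax, List.getD_cons_succ, List.take_succ_cons, List.foldl_cons]
          exact ih (max c x) k (by simpa using hi)

theorem pvOr_foldr_init (xs : List Int) (l : List Nat) (init : Option Int) :
    l.foldr (fun i acc => acc.or (pvCand xs i)) init = init.or (pvListOr xs l) := by
  induction l with
  | nil => cases init <;> simp [pvListOr]
  | cons a t ih =>
      simp only [List.foldr_cons, pvListOr] at *
      rw [ih, Option.or_assoc]

theorem pvListOr_concat (xs : List Int) (l : List Nat) (k : Nat) :
    pvListOr xs (l ++ [k]) = (pvCand xs k).or (pvListOr xs l) := by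
  unfold pvListOr
  rw [List.foldr_append]
  simp only [List.foldr_cons, List.foldr_nil, Option.none_or]
  rw [pvOr_foldr_init]
  rfl

-- B's backward search computes the last match over [1..k]
theorem pvFindB_eq_listOr (xs : List Int) (k : Nat) (hk : k + 1 ≤ xs.length) :
    pvFindB xs (pvBuildPmax 0 xs) k = pvListOr xs (List.range' 1 k) := by
  induction k with
  | zero => simp [pvFindB, pvListOr]
  | succ m ih =>
      have hm : m + 1 ≤ xs.length := by omega
      have hpm : (pvBuildPmax 0 xs).getD (m + 1) 0 = pvPm xs (m + 1) :=
        pvBuildPmax_getD xs 0 (m + 1) (by omega)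
      have hrange : List.range' 1 (m + 1) = List.range' 1 m ++ [m + 1] := by
        rw [List.range'_1_concat, Nat.add_comm 1 m]
      rw [hrange, pvListOr_concat, ← ih hm]
      simp only [pvFindB, hpm]
      by_cases h : xs.getD m 0 = pvPm xs (m + 1) ∧ xs.getD (m + 1) 0 < pvPm xs (m + 1)
      · have h2 : xs.getD (m + 1 - 1) 0 = pvPm xs (m + 1) ∧ xs.getD (m + 1) 0 < pvPm xs (m + 1) := by
          simpa using h
        rw [if_pos h, pvCand, if_pos h2, Option.some_or]
        exact congrArg some (by push_cast; ring)
      · have h2 : ¬ (xs.getD (m + 1 - 1) 0 = pvPm xs (m + 1) ∧ xs.getD (m + 1) 0 < pvPm xs (m + 1)) := by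
          simpa using h
        rw [if_neg h, pvCand, if_neg h2, Option.none_or]

-- A's fused scan computes the same last match, scanning forward
theorem pvLoopA_eq_listOr (xs : List Int) :
    ∀ (t : List Int) (j : Nat) (prev mc : Int) (res : Option Int),
      t = xs.drop j → 1 ≤ j → prev = xs.getD (j - 1) 0 → mc = pvPm xs (j - 1) →
      pvLoopA prev mc res (j : Int) t =
        (pvListOr xs (List.range' j (xs.length - j))).or res := by
  intro t
  induction t with
  | nil =>
      intro j prev mc res ht hj hprev hmc
      have hlen : xs.length ≤ j := List.drop_eq_nil_iff.mp ht.symm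
      have h0 : xs.length - j = 0 := by omega
      rw [h0]
      cases res <;> simp [pvLoopA, pvListOr]
  | cons cur t' ih =>
      intro j prev mc res ht hj hprev hmc
      have hjlt : j < xs.length := by
        by_contra h
        rw [List.drop_eq_nil_of_le (by omega)] at ht
        simp at ht
      have hcur : cur = xs.getD j 0 := by
        have h1 : xs.drop j = cur :: t' := ht.symm
        have : (xs.drop j).getD 0 0 = cur := by rw [h1]; rfl
        rw [List.getD_eq_getElem?_getD] at this ⊢
        simpa [List.getElem?_drop] using this.symm
      have ht' : t' = xs.drop (j + 1) := by
        have h1 : xs.drop j = cur :: t' := ht.symm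
        have h2 : (xs.drop j).tail = t' := by rw [h1]; rfl
        rw [List.tail_drop] at h2
        exact h2.symm
      have hm : max prev mc = pvPm xs j := by
        have hj1 : j - 1 < xs.length := by omega
        have := pvPm_succ xs (j - 1) hj1
        have hjj : j - 1 + 1 = j := by omega
        rw [hjj] at this
        rw [hprev, hmc, this, max_comm]
      simp only [pvLoopA]
      have hcast : ((j : Int) + 1) = ((j + 1 : Nat) : Int) := by push_cast; ring
      rw [hcast, ih (j + 1) cur (max prev mc)
            (if prev = max prev mc ∧ cur < max prev mc then some (j : Int) else res)
            ht' (by omega) (by simpa using hcur) (by simpa using hm)]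
      have hrange : List.range' j (xs.length - j) = j :: List.range' (j + 1) (xs.length - (j + 1)) := by
        have : xs.length - j = (xs.length - (j + 1)) + 1 := by omega
        rw [this, List.range'_succ]
      rw [hrange]
      have hif : (if prev = max prev mc ∧ cur < max prev mc then some (j : Int) else res)
          = (pvCand xs j).or res := by
        unfold pvCand
        rw [hm, hprev, hcur]
        by_cases h : xs.getD (j - 1) 0 = pvPm xs j ∧ xs.getD j 0 < pvPm xs j
        · rw [if_pos h, if_pos h]; rfl
        · rw [if_neg h, if_neg h]; rfl
      rw [hif]
      unfold pvListOr
      simp only [List.foldr_cons]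
      rw [pvOr_foldr_init]
      simp only [Option.none_or, Option.or_assoc]

-- ===== VERDICT (by name: the statement is the Claim_ definition above) =====
theorem calc_emptying_step_spec : Claim_equal_calc_emptying_step := by
  intro active _
  unfold Spec_calc_emptying_step calc_emptying_step calc_emptying_step_alt
  match active with
  | [] => rfl
  | a :: rest =>
      rw [if_neg (by simp)]
      show pvLoopA a 0 none 1 rest
        = pvFindB (a :: rest) (pvBuildPmax 0 (a :: rest)) ((a :: rest).length - 1)
      have hA := pvLoopA_eq_listOr (a :: rest) rest 1 a 0 none rfl le_rfl rfl rfl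
      have hB := pvFindB_eq_listOr (a :: rest) ((a :: rest).length - 1) (by simp)
      simp only [Nat.cast_one] at hA
      rw [hA, hB, Option.or_none]
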